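-- pv_equiv track=rewrite | github.com/juanigremes/Introduccion-a-la-programacion | Python/parcialPractica.py | pos_umbral
-- ===== SOURCE A (Python) =====
-- def pos_umbral (s: list[int], u: int) -> int:
--     res: int = -1
--     ingresosTotales: int = 0
--     for indice in range (0, len(s), 1):
--             if s[indice] > 0:
--                 ingresosTotales += s[indice]
--             if u < ingresosTotales:
--                 res = indice
--                 return res
--     return res
-- ===== SOURCE B (Python) =====
-- def pos_umbral(s: list[int], u: int) -> int:
--     # Build the (nondecreasing) prefix sums of the positive entries, then
--     # BINARY-SEARCH for the first index whose prefix sum strictly exceeds u.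
--     # Correct because each step adds max(x,0) >= 0, so the prefix sums are
--     # monotone nondecreasing and "prefix sum > u" is upward closed.
--     cums = []
--     total = 0
--     for x in s:
--         if x > 0:
--             total += x
--         cums.append(total)
--     lo, hi = 0, len(cums)
--     while lo < hi:
--         mid = (lo + hi) // 2
--         if u < cums[mid]:
--             hi = mid
--         else:
--             lo = mid + 1
--     return lo if lo < len(cums) else -1
-- ===== Notes on version B (the rewrite author's own statement) =====
-- stated objective: alternative
-- what changed: B builds the nondecreasing prefix sums of the positive entries and then binary-searches (instead of linearly scanning) for the first index whose prefix sum strictly exceeds u, returning -1 when none does; correctness relies on the prefix sums being monotone.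
import Mathlib
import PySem

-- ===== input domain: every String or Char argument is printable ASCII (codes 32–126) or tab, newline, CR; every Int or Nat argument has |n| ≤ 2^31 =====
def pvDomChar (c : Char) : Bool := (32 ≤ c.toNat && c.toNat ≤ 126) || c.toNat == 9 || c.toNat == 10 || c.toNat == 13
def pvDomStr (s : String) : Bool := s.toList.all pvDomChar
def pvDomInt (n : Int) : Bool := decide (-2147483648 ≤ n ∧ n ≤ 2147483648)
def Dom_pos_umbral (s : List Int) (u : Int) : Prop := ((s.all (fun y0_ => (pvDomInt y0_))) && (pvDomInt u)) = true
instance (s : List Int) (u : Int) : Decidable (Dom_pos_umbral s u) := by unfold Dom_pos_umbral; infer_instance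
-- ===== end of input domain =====

-- B replaces A's fused linear scan by prefix sums + binary search for the first index exceeding u; objective: alternative algorithm.


-- ===== PORT A =====
-- A's for-loop over range(0,len(s),1) with early return, carried as structural
-- recursion over the list with the index and the running total as state.
def posUmbralGoA (u : Int) : List Int → Int → Int → Int
  | [], _, _ => -1
  | x :: rest, tot, i =>
    let tot' := if x > 0 then tot + x else tot
    if u < tot' then i else posUmbralGoA u rest tot' (i + 1)

def pos_umbral (s : List Int) (u : Int) : Int := posUmbralGoA u s 0 0

-- ===== PORT B =====
-- phase 1 of Source B: the loop appending the running positive totals.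
def posUmbralCums : List Int → Int → List Int
  | [], _ => []
  | x :: rest, total =>
    let total' := if x > 0 then total + x else total
    total' :: posUmbralCums rest total'

-- phase 2 of Source B: the while-loop binary search (lo, hi are nonnegative
-- throughout in Python, so they are carried as Nat; (lo+hi)//2 = Nat division).
def posUmbralBS (cums : List Int) (u : Int) (lo hi : Nat) : Nat :=
  if _h : lo < hi then
    let mid := (lo + hi) / 2
    if u < cums.getD mid 0 then posUmbralBS cums u lo mid
    else posUmbralBS cums u (mid + 1) hi
  else lo
termination_by hi - lo
decreasing_by all_goals omega

def pos_umbral_alt (s : List Int) (u : Int) : Int :=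
  let cums := posUmbralCums s 0
  let lo := posUmbralBS cums u 0 cums.length
  if lo < cums.length then (lo : Int) else -1

-- ===== PRECONDITION & SPEC =====
def Spec_pos_umbral (s : List Int) (u : Int) (out : Int) : Prop := out = pos_umbral_alt s u
instance (s : List Int) (u : Int) (out : Int) : Decidable (Spec_pos_umbral s u out) := by unfold Spec_pos_umbral; infer_instance

-- ===== CLAIM (what is proved, stated in full; the proofs are below) =====
def Claim_equal_pos_umbral : Prop := ∀ (s : List Int) (u : Int), Dom_pos_umbral s u → Spec_pos_umbral s u (pos_umbral s u)

-- ===== LEMMAS AND PROOFS =====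

-- The prefix-sum list is a ≤-chain whose head is at least the starting total.
lemma posUmbralCums_chain : ∀ (s : List Int) (tot : Int),
    List.IsChain (· ≤ ·) (posUmbralCums s tot) ∧
    (∀ a, (posUmbralCums s tot).head? = some a → tot ≤ a) := by
  intro s
  induction s with
  | nil => intro tot; exact ⟨List.isChain_nil, by intro a h; simp [posUmbralCums] at h⟩
  | cons x rest ih =>
    intro tot
    have h1 := (ih (if x > 0 then tot + x else tot)).1
    have h2 := (ih (if x > 0 then tot + x else tot)).2
    constructor
    · simp only [posUmbralCums]
      rw [List.isChain_cons]
      exact ⟨fun b hb => h2 b hb, h1⟩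
    · intro a h
      simp only [posUmbralCums, List.head?] at h
      injection h with h
      subst h
      split_ifs with hx <;> omega

-- Monotonicity of getD on the prefix-sum list.
lemma posUmbralCums_mono (s : List Int) (tot : Int) :
    ∀ i j : Nat, i ≤ j → j < (posUmbralCums s tot).length →
    (posUmbralCums s tot).getD i 0 ≤ (posUmbralCums s tot).getD j 0 := by
  intro i j hij hj
  rcases Nat.eq_or_lt_of_le hij with rfl | hlt
  · exact le_refl _
  · have hp : List.Pairwise (· ≤ ·) (posUmbralCums s tot) :=
      List.isChain_iff_pairwise.mp (posUmbralCums_chain s tot).1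
    have hi : i < (posUmbralCums s tot).length := lt_trans hlt hj
    rw [List.getD_eq_getElem _ _ hi, List.getD_eq_getElem _ _ hj]
    exact List.pairwise_iff_getElem.mp hp i j hi hj hlt

-- The binary search returns the least index whose prefix sum exceeds u
-- (or the length when none does), characterised without reference to lo/hi.
lemma posUmbralBS_spec (cums : List Int) (u : Int)
    (hmono : ∀ i j : Nat, i ≤ j → j < cums.length →
      cums.getD i 0 ≤ cums.getD j 0) :
    ∀ lo hi : Nat, lo ≤ hi → hi ≤ cums.length →
    (∀ k, k < lo → ¬ u < cums.getD k 0) →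
    (∀ k, hi ≤ k → k < cums.length → u < cums.getD k 0) →
    (∀ k, k < posUmbralBS cums u lo hi → ¬ u < cums.getD k 0) ∧
    (posUmbralBS cums u lo hi < cums.length → u < cums.getD (posUmbralBS cums u lo hi) 0) ∧
    posUmbralBS cums u lo hi ≤ cums.length := by
  intro lo hi
  induction lo, hi using posUmbralBS.induct cums u with
  | case1 lo hi h mid hcmp ih =>
    intro _ hhi hlow hhigh
    rw [posUmbralBS, dif_pos h, if_pos hcmp]
    have hmid : mid < hi := by simp only [mid]; omega
    exact ih (by simp only [mid]; omega) (by omega) hlow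
      (fun k hk1 hk2 => lt_of_lt_of_le hcmp (hmono mid k hk1 hk2))
  | case2 lo hi h mid hcmp ih =>
    intro _ hhi hlow hhigh
    rw [posUmbralBS, dif_pos h, if_neg hcmp]
    have hmid : mid < hi := by simp only [mid]; omega
    refine ih (by omega) hhi (fun k hk => ?_) hhigh
    intro hu
    exact hcmp (lt_of_lt_of_le hu (hmono k mid (by omega) (by omega)))
  | case3 lo hi h =>
    intro hle hhi hlow hhigh
    rw [posUmbralBS, dif_neg h]
    exact ⟨hlow, fun hl => hhigh lo (by omega) hl, by omega⟩

-- A's fused loop over s equals the linear first-index search over the cums list.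
def posUmbralFind (u : Int) : List Int → Int → Int
  | [], _ => -1
  | t :: rest, i => if u < t then i else posUmbralFind u rest (i + 1)

lemma posUmbral_go_eq (u : Int) (s : List Int) : ∀ (tot i : Int),
    posUmbralGoA u s tot i = posUmbralFind u (posUmbralCums s tot) i := by
  induction s with
  | nil => intro tot i; rfl
  | cons x rest ih =>
    intro tot i
    simp only [posUmbralGoA, posUmbralCums, posUmbralFind]
    split_ifs with h h2 h2 <;> first | rfl | exact ih _ _

-- Characterisation of the linear search.
lemma posUmbralFind_spec (u : Int) : ∀ (l : List Int) (i : Int),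
    (posUmbralFind u l i = -1 ∧ ∀ j : Nat, j < l.length → ¬ u < l.getD j 0) ∨
    (∃ j : Nat, j < l.length ∧ posUmbralFind u l i = i + (j : Int) ∧
      u < l.getD j 0 ∧ ∀ k : Nat, k < j → ¬ u < l.getD k 0) := by
  intro l
  induction l with
  | nil => intro i; left; exact ⟨rfl, by intro j hj; simp at hj⟩
  | cons t rest ih =>
    intro i
    by_cases h : u < t
    · right
      exact ⟨0, by simp, by simp [posUmbralFind, h], by simpa using h,
        fun k hk => absurd hk (Nat.not_lt_zero k)⟩
    · rcases ih (i + 1) with ⟨hres, hall⟩ | ⟨j, hj, hres, hP, hmin⟩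
      · left
        refine ⟨by simp [posUmbralFind, h, hres], fun j hj => ?_⟩
        cases j with
        | zero => simpa using h
        | succ k =>
          simp only [List.length_cons] at hj
          simpa using hall k (by omega)
      · right
        refine ⟨j + 1, by simp; omega, ?_, by simpa using hP, fun k hk => ?_⟩
        · simp only [posUmbralFind, if_neg h, hres]; push_cast; ring
        · cases k with
          | zero => simpa using h
          | succ m => simpa using hmin m (by omega)

-- ===== VERDICT (by name: the statement is the Claim_ definition above) =====
theorem pos_umbral_spec : Claim_equal_pos_umbral := by
  intro s u _
  unfold Spec_pos_umbral pos_umbral pos_umbral_alt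
  rw [posUmbral_go_eq u s 0 0]
  set cums := posUmbralCums s 0 with hc
  have hmono := posUmbralCums_mono s 0
  rw [← hc] at hmono
  have hbs := posUmbralBS_spec cums u hmono 0 cums.length (Nat.zero_le _)
    (le_refl _) (fun k hk => absurd hk (Nat.not_lt_zero k))
    (fun k hk1 hk2 => absurd hk1 (by omega))
  obtain ⟨hlow, hhit, hle⟩ := hbs
  set r := posUmbralBS cums u 0 cums.length with hr
  show posUmbralFind u cums 0 = if r < cums.length then (r : Int) else -1
  rcases posUmbralFind_spec u cums 0 with ⟨hres, hall⟩ | ⟨j, hj, hres, hP, hmin⟩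
  · -- no index qualifies: binary search must return the length
    have hnl : ¬ r < cums.length := fun hl => hall r hl (hhit hl)
    rw [hres, if_neg hnl]
  · -- first qualifying index is j: binary search returns exactly j
    have hrj : r = j := by
      rcases Nat.lt_trichotomy r j with h1 | h1 | h1
      · exact absurd (hhit (lt_trans h1 hj)) (hmin r h1)
      · exact h1
      · exact absurd hP (hlow j h1)
    rw [hres, hrj, if_pos hj, zero_add]
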